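-- pv_equiv track=rewrite | github.com/hyunmin0317/Algorithm-Study | Codility/lesson3-3.py | solution
-- ===== SOURCE A (Python) =====
-- def solution(A):
--     N = len(A)
--     total = abs(sum(A))
--     min = total
--
--     for i in range(1, N):
--         ans = abs(2*sum(A[:i]) - total)
--         if min > ans:
--             min = ans
--     return min
-- ===== SOURCE B (Python) =====
-- def solution(A):
--     total = abs(sum(A))
--     best = total
--     p = 0
--     for x in A[:-1]:
--         p += x
--         cand = abs(2 * p - total)
--         if cand < best:
--             best = cand
--     return best
-- ===== Notes on version B (the rewrite author's own statement) =====
-- stated objective: faster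
-- what changed: Maintains a running prefix sum in a single pass over A[:-1] instead of re-summing the slice A[:i] for every split point.
import Mathlib
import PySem

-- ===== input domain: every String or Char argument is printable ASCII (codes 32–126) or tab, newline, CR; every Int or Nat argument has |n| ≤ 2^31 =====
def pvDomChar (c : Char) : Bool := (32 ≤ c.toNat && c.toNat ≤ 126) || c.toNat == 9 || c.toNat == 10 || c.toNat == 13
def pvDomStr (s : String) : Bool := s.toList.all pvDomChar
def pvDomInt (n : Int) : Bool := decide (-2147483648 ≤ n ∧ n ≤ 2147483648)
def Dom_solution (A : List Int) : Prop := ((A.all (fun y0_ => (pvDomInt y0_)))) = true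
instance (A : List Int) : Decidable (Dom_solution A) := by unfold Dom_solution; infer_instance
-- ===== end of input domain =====

-- B replaces A's quadratic re-summing of A[:i] by a single pass with a running prefix sum (objective: faster, O(n) vs O(n^2)).

-- ===== PORT A =====
def solution (A : List Int) : Int :=
  let N : Int := A.length
  let total := |A.sum|
  (PySem.List.pyRange 1 N 1).foldl
    (fun m i =>
      let ans := |2 * (PySem.List.slice A none (some i)).sum - total|
      if m > ans then ans else m) total

-- ===== PORT B =====
def solution_alt (A : List Int) : Int :=
  let total := |A.sum|
  ((PySem.List.slice A none (some (-1))).foldl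
    (fun (st : Int × Int) x =>
      let p := st.2 + x
      let cand := |2 * p - total|
      (if cand < st.1 then cand else st.1, p)) (total, 0)).1

-- ===== PRECONDITION & SPEC =====
def Spec_solution (A : List Int) (out : Int) : Prop := out = solution_alt A
instance (A : List Int) (out : Int) : Decidable (Spec_solution A out) := by unfold Spec_solution; infer_instance

-- ===== CLAIM (what is proved, stated in full; the proofs are below) =====
def Claim_equal_solution : Prop := ∀ (A : List Int), Dom_solution A → Spec_solution A (solution A)

-- ===== LEMMAS AND PROOFS =====

-- A's loop from split point k+1, versus B's running-sum loop over the remaining elements.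
theorem solution_main (A : List Int) (T : Int) :
    ∀ (n k : Nat) (m : Int), A.length - k ≤ n → k ≤ A.length →
    (PySem.List.pyRange ((k : Int) + 1) (A.length : Int) 1).foldl
      (fun m i =>
        let ans := |2 * (PySem.List.slice A none (some i)).sum - T|
        if m > ans then ans else m) m
    = (((A.drop k).dropLast).foldl
        (fun (st : Int × Int) x =>
          let p := st.2 + x
          let cand := |2 * p - T|
          (if cand < st.1 then cand else st.1, p)) (m, (A.take k).sum)).1 := by
  intro n
  induction n with
  | zero =>
    intro k m hn hk
    have hk' : A.length = k := by omega
    rw [PySem.List.pyRange_one_eq_nil (by omega)]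
    have : A.drop k = [] := by simp [List.drop_eq_nil_iff]; omega
    simp [this]
  | succ n ih =>
    intro k m hn hk
    by_cases h : k + 1 ≤ A.length
    · -- at least one more element before... two subcases: k+1 = length (loop over, tail empty) or k+1 < length
      by_cases h2 : k + 1 = A.length
      · rw [PySem.List.pyRange_one_eq_nil (by omega)]
        have hdrop : A.drop k = [A[k]'(by omega)] := by
          rw [List.drop_eq_getElem_cons (by omega), List.drop_eq_nil_iff.mpr (by omega)]
        simp [hdrop]
      · have hlt : k + 1 < A.length := by omega
        rw [PySem.List.pyRange_one_cons (by exact_mod_cast by omega)]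
        have hdrop : A.drop k = A[k]'(by omega) :: A.drop (k + 1) :=
          List.drop_eq_getElem_cons (by omega)
        have htail : A.drop (k + 1) ≠ [] := by
          simp [List.drop_eq_nil_iff]; omega
        rw [hdrop, List.dropLast_cons_of_ne_nil htail]
        simp only [List.foldl_cons]
        have hslice : PySem.List.slice A none (some ((k : Int) + 1)) = A.take (k + 1) := by
          rw [PySem.List.slice_to _ (by omega)]
          norm_num
        have hsum : (A.take k).sum + A[k]'(by omega) = (A.take (k + 1)).sum := by
          rw [List.sum_take_succ A k (by omega)]
        rw [hslice]
        have := ih (k + 1) (if m > |2 * (A.take (k+1)).sum - T| then |2 * (A.take (k+1)).sum - T| else m) (by omega) (by omega)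
        push_cast at this ⊢
        simp only [gt_iff_lt] at this ⊢
        rw [this, hsum]
    · rw [PySem.List.pyRange_one_eq_nil (by omega)]
      have : A.drop k = [] := by rw [List.drop_eq_nil_iff]; omega
      simp [this]

theorem solution_spec' (A : List Int) : solution A = solution_alt A := by
  unfold solution solution_alt
  rw [PySem.List.slice_to_neg_one]
  have := solution_main A |A.sum| A.length 0 |A.sum| (by omega) (by omega)
  simpa using this

-- ===== VERDICT (by name: the statement is the Claim_ definition above) =====
theorem solution_spec : Claim_equal_solution := by
  intro A _
  unfold Spec_solution
  exact solution_spec' A
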